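-- pv_equiv track=rewrite | github.com/nietsdoenster/eurovisionfiles | examenopdracht.py | count_slavic_countries
-- ===== SOURCE A (Python) =====
-- def count_slavic_countries(tokens):
-- 	first1 = tokens
-- 	count = 0
-- 	for token in first1:
-- 		if token in ['Poland', 'Russia', 'Ukraine', 'Czech Republic', 'Belarus', 'Slovakia']:
-- 			count +=1
-- 		else:
-- 			None
-- 	return count
-- ===== SOURCE B (Python) =====
-- def count_slavic_countries(tokens):
--     counts = {}
--     for t in tokens:
--         counts[t] = counts.get(t, 0) + 1
--     return sum(counts.get(name, 0) for name in ('Poland', 'Russia', 'Ukraine', 'Czech Republic', 'Belarus', 'Slovakia'))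
-- ===== Notes on version B (the rewrite author's own statement) =====
-- stated objective: alternative
-- what changed: B builds a frequency dictionary of the tokens in one pass and then sums the counts of the six fixed Slavic names, instead of testing each token against the name list inside the loop.
import Mathlib
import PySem

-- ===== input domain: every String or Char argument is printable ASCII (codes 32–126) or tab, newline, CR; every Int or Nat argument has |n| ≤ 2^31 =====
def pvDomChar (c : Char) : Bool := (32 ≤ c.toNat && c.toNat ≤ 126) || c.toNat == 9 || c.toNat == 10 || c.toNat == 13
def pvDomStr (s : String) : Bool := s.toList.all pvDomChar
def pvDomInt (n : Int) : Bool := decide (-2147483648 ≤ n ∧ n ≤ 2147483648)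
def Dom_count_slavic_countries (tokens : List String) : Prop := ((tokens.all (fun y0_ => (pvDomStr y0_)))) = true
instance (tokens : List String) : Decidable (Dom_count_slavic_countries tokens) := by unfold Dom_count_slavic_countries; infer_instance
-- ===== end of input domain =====

-- B builds a frequency dictionary of the tokens in one pass and then sums the counts of the
-- six fixed Slavic names (alternative structure, same cost; return value only).


-- ===== PORT A =====
def count_slavic_countries (tokens : List String) : Int :=
  let first1 := tokens
  first1.foldl (fun count token =>
    if token ∈ ["Poland", "Russia", "Ukraine", "Czech Republic", "Belarus", "Slovakia"]
    then count + 1 else count) 0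

-- ===== PORT B =====
def count_slavic_countries_alt (tokens : List String) : Int :=
  let counts := tokens.foldl (fun d t => d.insert t (d.getD t 0 + 1)) PySem.Dict.empty
  (["Poland", "Russia", "Ukraine", "Czech Republic", "Belarus", "Slovakia"].map
    (fun name => counts.getD name 0)).sum

-- ===== PRECONDITION & SPEC =====
def Spec_count_slavic_countries (tokens : List String) (out : Int) : Prop := out = count_slavic_countries_alt tokens
instance (tokens : List String) (out : Int) : Decidable (Spec_count_slavic_countries tokens out) := by unfold Spec_count_slavic_countries; infer_instance

-- ===== CLAIM (what is proved, stated in full; the proofs are below) =====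
def Claim_equal_count_slavic_countries : Prop := ∀ (tokens : List String), Dom_count_slavic_countries tokens → Spec_count_slavic_countries tokens (count_slavic_countries tokens)

-- ===== LEMMAS AND PROOFS =====

-- A's membership-test loop computes the sum of the six per-name counts.
theorem foldl_mem_count (xs : List String) (c : Int) :
    xs.foldl (fun count token =>
      if token ∈ ["Poland", "Russia", "Ukraine", "Czech Republic", "Belarus", "Slovakia"]
      then count + 1 else count) c
    = c + (xs.count "Poland" : Int) + (xs.count "Russia" : Int) + (xs.count "Ukraine" : Int)
        + (xs.count "Czech Republic" : Int) + (xs.count "Belarus" : Int) + (xs.count "Slovakia" : Int) := by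
  induction xs generalizing c with
  | nil => simp
  | cons x xs ih =>
    simp only [List.foldl_cons, ih, List.count_cons]
    by_cases h : x ∈ ["Poland", "Russia", "Ukraine", "Czech Republic", "Belarus", "Slovakia"]
    · rw [if_pos h]
      simp only [List.mem_cons, List.not_mem_nil, or_false] at h
      rcases h with h | h | h | h | h | h <;> subst h <;> simp <;> ring
    · rw [if_neg h]
      simp only [List.mem_cons, List.not_mem_nil, or_false, not_or] at h
      obtain ⟨h1, h2, h3, h4, h5, h6⟩ := h
      simp [h1, h2, h3, h4, h5, h6]

-- ===== VERDICT (by name: the statement is the Claim_ definition above) =====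
theorem count_slavic_countries_spec : Claim_equal_count_slavic_countries := by
  intro tokens _
  unfold Spec_count_slavic_countries count_slavic_countries count_slavic_countries_alt
  simp only [List.map, List.sum_cons, List.sum_nil,
    PySem.Dict.getD_foldl_insert_add_one, PySem.Dict.getD_empty]
  rw [foldl_mem_count]
  ring
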